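-- pv_equiv track=rewrite | github.com/teymursaif/GCEx | modules/fit_galaxy.py | read_numbers
-- ===== SOURCE A (Python) =====
-- def read_numbers(input_string):
--     accepted_chars = ['.','1','2','3','4','5','6','7','8','9','0','-','+']
--     output_string = ''
--     for c in input_string :
--         if c in accepted_chars:
--             output_string = output_string+c
--         elif c == 'e':
--             output_string = output_string+'e'
--         else :
--             output_string = output_string +' '
--     return output_string
-- ===== SOURCE B (Python) =====
-- import re
--
-- def read_numbers(input_string):
--     return re.sub(r'[^0-9.+e-]', ' ', input_string)
-- ===== Notes on version B (the rewrite author's own statement) =====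
-- stated objective: idiomatic
-- what changed: The explicit character loop with a string-concatenation accumulator is replaced by a single re.sub with a negated character class; no loop or accumulator remains.
import Mathlib
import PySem

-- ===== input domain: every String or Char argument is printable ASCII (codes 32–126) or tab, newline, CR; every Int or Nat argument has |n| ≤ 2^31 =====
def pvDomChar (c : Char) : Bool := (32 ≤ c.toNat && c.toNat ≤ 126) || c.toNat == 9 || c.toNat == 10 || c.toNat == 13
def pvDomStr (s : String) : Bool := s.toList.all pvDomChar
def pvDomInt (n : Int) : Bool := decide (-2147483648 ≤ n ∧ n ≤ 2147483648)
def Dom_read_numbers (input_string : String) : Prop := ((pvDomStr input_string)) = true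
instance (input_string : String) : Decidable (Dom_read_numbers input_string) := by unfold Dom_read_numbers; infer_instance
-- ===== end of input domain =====

-- B replaces A's character loop and string-concatenation accumulator by a single
-- regex substitution (one per-character classification pass); idiomatic, same cost class.

-- ===== PORT A =====
-- the literal list `accepted_chars` of A
def accepted_chars_A : List Char := ['.','1','2','3','4','5','6','7','8','9','0','-','+']

-- A's loop: fold over the characters, appending to output_string
def read_numbers (input_string : String) : String :=
  input_string.toList.foldl
    (fun output_string c =>
      if c ∈ accepted_chars_A then output_string ++ String.ofList [c]
      else if c = 'e' then output_string ++ "e"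
      else output_string ++ " ")
    ""

-- ===== PORT B =====
-- membership in the regex character class [^0-9.+e-] (true = the char is NOT replaced)
def inClass_B (c : Char) : Bool :=
  ('0' ≤ c && c ≤ '9') || c == '.' || c == '+' || c == 'e' || c == '-'

-- re.sub(r'[^0-9.+e-]', ' ', s): each char outside the class becomes one space
def read_numbers_alt (input_string : String) : String :=
  String.ofList (input_string.toList.map (fun c => if inClass_B c then c else ' '))

-- ===== PRECONDITION & SPEC =====
def Spec_read_numbers (input_string : String) (out : String) : Prop := out = read_numbers_alt input_string
instance (input_string : String) (out : String) : Decidable (Spec_read_numbers input_string out) := by unfold Spec_read_numbers; infer_instance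

-- ===== CLAIM (what is proved, stated in full; the proofs are below) =====
def Claim_equal_read_numbers : Prop := ∀ (input_string : String), Dom_read_numbers input_string → Spec_read_numbers input_string (read_numbers input_string)

-- ===== LEMMAS AND PROOFS =====

-- inClass_B is exactly "accepted by A (or 'e')"
lemma class_iff (c : Char) : inClass_B c = true ↔ (c ∈ accepted_chars_A ∨ c = 'e') := by
  constructor
  · intro hb
    unfold inClass_B at hb
    simp only [Bool.or_eq_true, Bool.and_eq_true, decide_eq_true_eq, beq_iff_eq] at hb
    rcases hb with ((((⟨h1, h2⟩ | h) | h) | h) | h)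
    · left
      rw [Char.le_def] at h1 h2
      have hl : 48 ≤ c.toNat := h1
      have hr : c.toNat ≤ 57 := h2
      rw [← Char.ofNat_toNat c]
      interval_cases h : c.toNat <;> decide
    · subst h; left; decide
    · subst h; left; decide
    · subst h; right; rfl
    · subst h; left; decide
  · rintro (h | h)
    · fin_cases h <;> decide
    · subst h; decide

-- per-character agreement: A's three-way branch appends exactly B's mapped char
lemma step_eq (acc : String) (c : Char) :
    (if c ∈ accepted_chars_A then acc ++ String.ofList [c]
     else if c = 'e' then acc ++ "e"
     else acc ++ " ")
    = acc ++ String.ofList [if inClass_B c then c else ' '] := by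
  by_cases hb : inClass_B c = true
  · rcases (class_iff c).mp hb with h | h
    · simp [h, hb]
    · subst h
      by_cases hm : 'e' ∈ accepted_chars_A
      · exact absurd hm (by decide)
      · simp [hm, hb]
  · have hm : c ∉ accepted_chars_A := fun h => hb ((class_iff c).mpr (Or.inl h))
    have he : c ≠ 'e' := fun h => hb ((class_iff c).mpr (Or.inr h))
    simp [hm, he, hb]

lemma fold_eq (l : List Char) (acc : String) :
    l.foldl
      (fun output_string c =>
        if c ∈ accepted_chars_A then output_string ++ String.ofList [c]
        else if c = 'e' then output_string ++ "e"
        else output_string ++ " ") acc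
    = acc ++ String.ofList (l.map (fun c => if inClass_B c then c else ' ')) := by
  induction l generalizing acc with
  | nil => simp
  | cons c l ih =>
      simp only [List.foldl_cons, List.map_cons]
      rw [step_eq, ih, String.append_assoc, ← String.ofList_append,
        List.singleton_append]

-- ===== VERDICT (by name: the statement is the Claim_ definition above) =====
theorem read_numbers_spec : Claim_equal_read_numbers := by
  intro s _
  unfold Spec_read_numbers read_numbers read_numbers_alt
  rw [fold_eq]
  simp
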